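-- pv_equiv track=rewrite | github.com/DawZaw/AdventOfCode2023 | day18/day_18.py | get_points
-- ===== SOURCE A (Python) =====
-- from typing import TypeAlias, Literal, cast
--
-- Point: TypeAlias = tuple[int, int]
--
-- Direction: TypeAlias = Literal["U", "R", "D", "L"]
--
-- def get_points(directions: list[Direction], steps: list[int]) -> list[Point]:
--     points: list[Point] = [(0, 0)]
--     prev_point_idx: int = 0
--
--     for direction, step in zip(directions, steps):
--         x: int = points[prev_point_idx][0]
--         y: int = points[prev_point_idx][1]
--         if direction == "R":
--             points.append((x + step, y))
--         elif direction == "L":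
--             points.append((x - step, y))
--         elif direction == "U":
--             points.append((x, y - step))
--         elif direction == "D":
--             points.append((x, y + step))
--         prev_point_idx += 1
--
--     return points[:-1]  # Drop last point which is the same as first (0, 0)
-- ===== SOURCE B (Python) =====
-- def get_points(directions, steps):
--     # Back-to-front: build the polyline of the SUFFIX of moves relative to its own
--     # start, then translating it by the current move's displacement and prepending
--     # the origin; finally drop the closing point, as the task discards it.
--     pts = [(0, 0)]
--     for d, s in reversed(list(zip(directions, steps))):
--         dx, dy = {"R": (s, 0), "L": (-s, 0), "U": (0, -s), "D": (0, s)}[d]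
--         pts = [(0, 0)] + [(x + dx, y + dy) for x, y in pts]
--     return pts[:-1]
-- ===== Notes on version B (the rewrite author's own statement) =====
-- stated objective: alternative
-- what changed: B computes the polyline back-to-front: folding over the reversed move list, each step translates the whole suffix polyline (built relative to its own start) by the current move's displacement and prepends the origin, instead of A's forward loop that grows a list while indexing its previous element; the trade is O(n^2) list rebuilding for a loop with no running position or index state.
-- outside the precondition, e.g. on get_points(['X'], [1]): A returns [], B raises KeyError
import Mathlib
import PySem

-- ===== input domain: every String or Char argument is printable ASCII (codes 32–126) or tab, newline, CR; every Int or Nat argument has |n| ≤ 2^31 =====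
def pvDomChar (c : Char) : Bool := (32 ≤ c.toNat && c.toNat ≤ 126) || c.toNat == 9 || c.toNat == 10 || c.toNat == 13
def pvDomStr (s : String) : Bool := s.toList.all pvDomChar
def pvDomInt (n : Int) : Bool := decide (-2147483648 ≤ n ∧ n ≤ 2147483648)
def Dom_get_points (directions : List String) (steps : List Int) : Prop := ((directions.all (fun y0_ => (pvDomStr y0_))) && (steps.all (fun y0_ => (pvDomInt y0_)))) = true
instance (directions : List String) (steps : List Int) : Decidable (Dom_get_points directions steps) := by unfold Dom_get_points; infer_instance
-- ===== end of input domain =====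

-- B builds the polyline back-to-front (fold over the reversed moves, translating the suffix
-- polyline and prepending the origin) instead of A's forward grow-and-index-previous loop;
-- an alternative decomposition, not faster (B rebuilds the list each step).


-- ===== PORT A =====
-- state: (points list, prev_point_idx); points[prev_point_idx] via pyGet? (none = IndexError,
-- which only occurs outside Pre_; getD's default is never used inside Pre_)
def get_points_step (st : List (Int × Int) × Int) (ds : String × Int) :
    List (Int × Int) × Int :=
  let points := st.1
  let p := (PySem.List.pyGet? points st.2).getD (0, 0)
  let x := p.1
  let y := p.2
  let points :=
    if ds.1 == "R" then points ++ [(x + ds.2, y)]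
    else if ds.1 == "L" then points ++ [(x - ds.2, y)]
    else if ds.1 == "U" then points ++ [(x, y - ds.2)]
    else if ds.1 == "D" then points ++ [(x, y + ds.2)]
    else points
  (points, st.2 + 1)

def get_points (directions : List String) (steps : List Int) : List (Int × Int) :=
  let st := (directions.zip steps).foldl get_points_step ([(0, 0)], 0)
  PySem.List.slice st.1 none (some (-1))

-- ===== PORT B =====
-- the per-step dict literal {"R": (s,0), ...}[d]; a lookup miss is Python's KeyError,
-- reached only outside Pre_ (getD's default is never used inside Pre_)
def get_points_alt_delta (ds : String × Int) : Int × Int :=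
  (((((PySem.Dict.empty.insert "R" (ds.2, 0)).insert "L" (-ds.2, 0)).insert "U"
      (0, -ds.2)).insert "D" (0, ds.2)).getD ds.1 (0, 0))

-- one step of B's reversed fold: translate the suffix polyline, prepend the origin
def get_points_alt_step (pts : List (Int × Int)) (ds : String × Int) : List (Int × Int) :=
  let d := get_points_alt_delta ds
  (0, 0) :: pts.map (fun p => (p.1 + d.1, p.2 + d.2))

def get_points_alt (directions : List String) (steps : List Int) : List (Int × Int) :=
  PySem.List.slice ((directions.zip steps).reverse.foldl get_points_alt_step [(0, 0)])
    none (some (-1))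

-- ===== PRECONDITION & SPEC =====
-- Pre_ excludes pairs whose direction string is not one of R/L/U/D: A raises IndexError on a
-- bad non-final direction, and on a bad final direction A's [:-1] drops the real last point
-- (an artefact of its skipped append), while B's dict lookup naturally raises KeyError there.
def Pre_get_points (directions : List String) (steps : List Int) : Prop :=
  ∀ p ∈ directions.zip steps, p.1 = "R" ∨ p.1 = "L" ∨ p.1 = "U" ∨ p.1 = "D"
instance (directions : List String) (steps : List Int) : Decidable (Pre_get_points directions steps) := by unfold Pre_get_points; infer_instance

def pvWitness_get_points : List String × List Int := (["R", "D", "L", "U"], [3, 2, 3, 2])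

def Spec_get_points (directions : List String) (steps : List Int) (out : List (Int × Int)) : Prop := out = get_points_alt directions steps
instance (directions : List String) (steps : List Int) (out : List (Int × Int)) : Decidable (Spec_get_points directions steps out) := by unfold Spec_get_points; infer_instance

-- ===== CLAIM (what is proved, stated in full; the proofs are below) =====
def Claim_equal_get_points : Prop := ∀ (directions : List String) (steps : List Int), Dom_get_points directions steps → Pre_get_points directions steps → Spec_get_points directions steps (get_points directions steps)

-- ===== LEMMAS AND PROOFS =====

-- the direction's displacement (proof-side characterisation, used by both loop lemmas)
def pdelta (ds : String × Int) : Int × Int :=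
  if ds.1 = "R" then (ds.2, 0) else if ds.1 = "L" then (-ds.2, 0)
  else if ds.1 = "U" then (0, -ds.2) else (0, ds.2)

-- the full prefix-position list [(0,0), p1, ..., pn] of a move list, defined head-first
def Pfull : List (String × Int) → List (Int × Int)
  | [] => [(0, 0)]
  | hd :: tl => (0, 0) :: (Pfull tl).map (fun p => (p.1 + (pdelta hd).1, p.2 + (pdelta hd).2))

theorem alt_delta_eq (ds : String × Int)
    (h : ds.1 = "R" ∨ ds.1 = "L" ∨ ds.1 = "U" ∨ ds.1 = "D") :
    get_points_alt_delta ds = pdelta ds := by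
  rcases h with h | h | h | h <;>
    simp [get_points_alt_delta, pdelta, h, PySem.Dict.getD, PySem.Dict.get?,
      PySem.Dict.insert, PySem.Dict.empty]

-- B's reversed fold produces exactly the full prefix-position list
theorem alt_fold (l : List (String × Int))
    (hl : ∀ p ∈ l, p.1 = "R" ∨ p.1 = "L" ∨ p.1 = "U" ∨ p.1 = "D") :
    l.reverse.foldl get_points_alt_step [(0, 0)] = Pfull l := by
  induction l with
  | nil => simp [Pfull]
  | cons hd tl ih =>
    have := alt_delta_eq hd (hl hd (List.mem_cons_self ..))
    simp only [List.reverse_cons, List.foldl_append, List.foldl_cons, List.foldl_nil,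
      ih (fun p hp => hl p (List.mem_cons_of_mem _ hp))]
    simp [get_points_alt_step, this, Pfull]

-- A's forward fold from a partial list also produces (a translate of) the prefix-position list
theorem a_fold (l : List (String × Int))
    (hl : ∀ p ∈ l, p.1 = "R" ∨ p.1 = "L" ∨ p.1 = "U" ∨ p.1 = "D")
    (out : List (Int × Int)) (x y : Int) :
    l.foldl get_points_step (out ++ [(x, y)], (out.length : Int)) =
      (out ++ (Pfull l).map (fun p => (p.1 + x, p.2 + y)),
        (out.length : Int) + l.length) := by
  induction l generalizing out x y with
  | nil => simp [Pfull]
  | cons hd tl ih =>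
    have hhd := hl hd (List.mem_cons_self ..)
    have hstep : get_points_step (out ++ [(x, y)], (out.length : Int)) hd =
        ((out ++ [(x, y)]) ++ [(x + (pdelta hd).1, y + (pdelta hd).2)],
          ((out ++ [(x, y)]).length : Int)) := by
      rcases hhd with h | h | h | h <;>
        simp [get_points_step, pdelta, PySem.List.pyGet?, PySem.List.pyIdx?, h] <;> ring_nf
    have hmaps : ∀ d1 d2 : Int,
        (fun p : Int × Int => (p.1 + (x + d1), p.2 + (y + d2))) =
          (fun p : Int × Int => (p.1 + x, p.2 + y)) ∘
            (fun p : Int × Int => (p.1 + d1, p.2 + d2)) := by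
      intro d1 d2; funext p; simp [Function.comp]; constructor <;> ring
    simp only [List.foldl_cons, hstep,
      ih (fun p hp => hl p (List.mem_cons_of_mem _ hp))]
    rw [Prod.mk.injEq]
    constructor
    · simp only [Pfull, List.map_cons, List.map_map, List.append_assoc, hmaps]
      simp
    · simp; ring

-- ===== VERDICT (by name: the statement is the Claim_ definition above) =====
theorem get_points_spec : Claim_equal_get_points := by
  intro directions steps _ hpre
  unfold Spec_get_points get_points get_points_alt
  have hA := a_fold (directions.zip steps) hpre [] 0 0
  simp only [List.nil_append, List.length_nil, Int.natCast_zero] at hA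
  rw [alt_fold (directions.zip steps) hpre]
  simp [hA]
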